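-- pv_equiv track=rewrite | github.com/LukeNeedle/Secure-messaging | hash_function.py | hash_variable
-- ===== SOURCE A (Python) =====
-- def hash_variable(variable:str, salt:str):
--     """
--     Hashes the variable that has been given and applied the salt to make it harder to decode.
--
--     Args:
--         variable (str): The variable that needs hashing
--         salt (str): The salt that is being applied to the variable
--
--     Returns:
--         str: The hashed variable
--     """
--
--     # Adds salt to the variable
--     # Currently it adds the salt inbetween every other character. eg: {SALT}AB{SALT}CD{SALT}
--     x = 0
--     for letter in variable:
--         if x == 0:
--             saltedVariable = salt
--             x += 1
--         elif x == 1: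
--             saltedVariable += letter
--             x += 1
--         elif x == 2:
--             saltedVariable += letter + salt
--             x = 1
--     if x == 2:
--         saltedVariable += salt
--
--     # Splits the salted variable into chunks with a length of 5
--     chunks = []
--     for i in range(0, len(saltedVariable), 5):
--         if i+5 < len(saltedVariable):
--             chunks.append(saltedVariable[i:i+5])
--         else:
--             chunks.append(saltedVariable[i:len(saltedVariable)])
--
--     # Chunks are split into 2 parts, where every other item is in one list and the remaining are in the other list
--
--     # Reverse the contents of the first chunk
--     firstChunkFlipped = []
--     for item in chunks[0::2]:
--         firstChunkFlipped.append(str(item)[::-1])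
--
--     # Reverse the second chunk
--     secondChunkReversed = []
--     for i in range(len(chunks[1::2])-1, -1, -1):
--         secondChunkReversed.append(chunks[1::2][i])
--
--     # Piece the chunks back together
--     scrambledVariableList = []
--     for i in range(min(len(firstChunkFlipped), len(secondChunkReversed))):
--         scrambledVariableList.append(str(firstChunkFlipped[i]) + str(secondChunkReversed[i]))
--
--     scrambledVariableList = list(''.join(scrambledVariableList))
--
--     saltValue = 0
--     for letter in list(salt):
--         saltValue += ord(letter)
--
--     # Turn the characters into their ascii values and turn it into hex
--     asciiHexCharacterList = []
--     for letter in scrambledVariableList: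
--         asciiHexCharacterList.append(hex((ord(letter) + (len(variable) * saltValue)) * len(variable))[2:])
--
--     return ''.join(asciiHexCharacterList)
-- ===== SOURCE B (Python) =====
-- def _salt_pairs(rest, salt):
--     # append salt after every (possibly incomplete) pair of characters
--     out = ''
--     while rest:
--         out += rest[:2] + salt
--         rest = rest[2:]
--     return out
--
--
-- def _chunks5(s):
--     out = []
--     while s:
--         out.append(s[:5])
--         s = s[5:]
--     return out
--
--
-- def _alternate(items):
--     even, odd = [], []
--     while items:
--         even.append(items[0])
--         if len(items) > 1:
--             odd.append(items[1])
--         items = items[2:]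
--     return even, odd
--
--
-- def hash_variable(variable, salt):
--     n = len(variable)
--     salted = salt + _salt_pairs(variable[1:], salt)
--     even, odd = _alternate(_chunks5(salted))
--     scrambled = ''.join(e[::-1] + o for e, o in zip(even, reversed(odd)))
--     salt_value = sum(map(ord, salt))
--     return ''.join(hex((ord(c) + n * salt_value) * n)[2:] for c in scrambled)
-- ===== Notes on version B (the rewrite author's own statement) =====
-- stated objective: simpler
-- what changed: Replaces A's x-state machine with a salt-after-each-pair construction over variable[1:], replaces the index/range chunking and the [0::2]/[1::2] slicing with direct while-loop consumption (5 at a time, 2 at a time), and fuses the flip/reverse/interleave passes into one join over zip(even, reversed(odd)).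
import Mathlib
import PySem

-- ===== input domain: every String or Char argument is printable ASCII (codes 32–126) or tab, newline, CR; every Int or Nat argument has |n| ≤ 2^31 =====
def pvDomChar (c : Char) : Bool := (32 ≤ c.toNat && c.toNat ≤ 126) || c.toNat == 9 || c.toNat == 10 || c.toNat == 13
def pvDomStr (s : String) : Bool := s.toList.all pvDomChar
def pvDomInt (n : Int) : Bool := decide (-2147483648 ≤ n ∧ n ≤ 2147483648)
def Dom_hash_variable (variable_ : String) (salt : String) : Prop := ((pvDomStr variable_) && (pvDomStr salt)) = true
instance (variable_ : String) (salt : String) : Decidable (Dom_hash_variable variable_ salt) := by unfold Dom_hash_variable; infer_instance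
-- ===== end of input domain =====

-- B restructures the same hashing pipeline (salt-after-each-pair construction, recursive
-- 5-chunking, two-at-a-time even/odd split, zip-with-reversed interleave) — objective:
-- simpler decomposition, same cost; equivalence is claimed for non-empty `variable`
-- (Python A raises UnboundLocalError on the empty string).

-- ===== PORT A =====
-- shared helper for Python's hex(n)[2:] on a non-negative argument (both programs call the hex builtin)
def hexDigit (n : Nat) : Char := if n < 10 then Char.ofNat (48 + n) else Char.ofNat (87 + n)

def hexChars (n : Nat) : List Char :=
  if h : n < 16 then [hexDigit n]
  else hexChars (n / 16) ++ [hexDigit (n % 16)]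
decreasing_by exact Nat.div_lt_self (by omega) (by omega)

-- one step of A's x-state machine over the letters of `variable`
def saltStep (saltL : List Char) (st : Int × List Char) (letter : Char) : Int × List Char :=
  if st.1 == 0 then (st.1 + 1, saltL)
  else if st.1 == 1 then (st.1 + 1, st.2 ++ [letter])
  else if st.1 == 2 then (1, st.2 ++ [letter] ++ saltL)
  else st

def hash_variable (variable_ : String) (salt : String) : String :=
  let v := variable_.toList
  let saltL := salt.toList
  -- saltedVariable starts unbound in Python; [] is only reachable when v = [] (excluded by Pre_)
  let st := v.foldl (saltStep saltL) (0, [])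
  let saltedVariable := if st.1 == 2 then st.2 ++ saltL else st.2
  let chunks := (PySem.List.pyRange 0 (saltedVariable.length : Int) 5).foldl (fun acc i =>
      if i + 5 < (saltedVariable.length : Int) then
        acc ++ [PySem.List.slice saltedVariable (some i) (some (i + 5))]
      else
        acc ++ [PySem.List.slice saltedVariable (some i) (some (saltedVariable.length : Int))]) []
  -- chunks[0::2] / item[::-1] / chunks[1::2]: step ≠ 0, so slice? is never none; .getD [] is exact
  let firstChunkFlipped := ((PySem.List.slice? chunks (some 0) none 2).getD []).foldl
      (fun acc item => acc ++ [(PySem.List.slice? item none none (-1)).getD []]) []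
  let secondChunkReversed := (PySem.List.pyRange
        ((((PySem.List.slice? chunks (some 1) none 2).getD []).length : Int) - 1) (-1) (-1)).foldl
      (fun acc i => acc ++ [PySem.List.pyGetD ((PySem.List.slice? chunks (some 1) none 2).getD []) i []]) []
  let scrambledVariableList := (PySem.List.pyRange 0
        ((min firstChunkFlipped.length secondChunkReversed.length : Nat) : Int) 1).foldl
      (fun acc i => acc ++ [PySem.List.pyGetD firstChunkFlipped i [] ++ PySem.List.pyGetD secondChunkReversed i []]) []
  let scrambled := PySem.Chars.join [] scrambledVariableList
  let saltValue := saltL.foldl (fun acc c => acc + c.toNat) 0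
  let hexList := scrambled.foldl (fun acc c =>
      acc ++ [hexChars ((c.toNat + v.length * saltValue) * v.length)]) []
  String.ofList (PySem.Chars.join [] hexList)

-- ===== PORT B =====
-- while rest: out += rest[:2] + salt; rest = rest[2:]
def saltPairs : List Char → List Char → List Char → List Char
  | [], _, out => out
  | x :: xs, salt, out => saltPairs ((x :: xs).drop 2) salt (out ++ (x :: xs).take 2 ++ salt)
termination_by rest _ _ => rest.length
decreasing_by simp

-- while s: out.append(s[:5]); s = s[5:]
def chunks5 : List Char → List (List Char) → List (List Char)
  | [], out => out
  | x :: xs, out => chunks5 ((x :: xs).drop 5) (out ++ [(x :: xs).take 5])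
termination_by s _ => s.length
decreasing_by simp

-- while items: even.append(items[0]); if len(items) > 1: odd.append(items[1]); items = items[2:]
def alternate : List (List Char) → List (List Char) → List (List Char) →
    List (List Char) × List (List Char)
  | [], even, odd => (even, odd)
  | [a], even, odd => alternate [] (even ++ [a]) odd
  | a :: b :: t, even, odd => alternate t (even ++ [a]) (odd ++ [b])

def hash_variable_alt (variable_ : String) (salt : String) : String :=
  let v := variable_.toList
  let saltL := salt.toList
  let n := v.length
  let salted := saltL ++ saltPairs (v.drop 1) saltL []
  let p := alternate (chunks5 salted []) [] []
  -- e[::-1] and reversed(odd) are list reversal (PySem.List.slice?_none_none_neg_one)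
  let scrambled := PySem.Chars.join [] ((p.1.zip p.2.reverse).map (fun q => q.1.reverse ++ q.2))
  let saltValue := (saltL.map Char.toNat).sum
  String.ofList (PySem.Chars.join [] (scrambled.map (fun c => hexChars ((c.toNat + n * saltValue) * n))))

-- ===== PRECONDITION & SPEC =====
-- Pre_ excludes only variable_ = "": there Python A raises UnboundLocalError (saltedVariable is never assigned).
def Pre_hash_variable (variable_ : String) (salt : String) : Prop := variable_ ≠ ""
instance (variable_ : String) (salt : String) : Decidable (Pre_hash_variable variable_ salt) := by
  unfold Pre_hash_variable; infer_instance

def pvWitness_hash_variable : String × String := ("ab", "q")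

def Spec_hash_variable (variable_ : String) (salt : String) (out : String) : Prop :=
  out = hash_variable_alt variable_ salt
instance (variable_ : String) (salt : String) (out : String) : Decidable (Spec_hash_variable variable_ salt out) := by
  unfold Spec_hash_variable; infer_instance

-- ===== CLAIM (what is proved, stated in full; the proofs are below) =====
def Claim_equal_hash_variable : Prop := ∀ (variable_ : String) (salt : String),
  Dom_hash_variable variable_ salt → Pre_hash_variable variable_ salt →
  Spec_hash_variable variable_ salt (hash_variable variable_ salt)

-- ===== LEMMAS AND PROOFS =====

-- induction principle matching a loop that consumes the head and then (k more) elements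
theorem listDropStep {α : Type} (k : Nat) {P : List α → Prop}
    (h0 : P []) (h : ∀ a t, P (List.drop k t) → P (a :: t)) : ∀ l, P l := by
  intro l
  induction hn : l.length using Nat.strong_induction_on generalizing l with
  | _ n ih =>
    cases l with
    | nil => exact h0
    | cons a t =>
      exact h a t (ih (List.drop k t).length (by simp_all; omega) _ rfl)

theorem saltPairs_nil (s o : List Char) : saltPairs [] s o = o := by
  unfold saltPairs; rfl

theorem saltPairs_cons (x : Char) (xs s o : List Char) :
    saltPairs (x :: xs) s o = saltPairs (xs.drop 1) s (o ++ ([x] ++ xs.take 1) ++ s) := by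
  conv_lhs => unfold saltPairs
  simp

theorem chunks5_nil (o : List (List Char)) : chunks5 [] o = o := by
  unfold chunks5; rfl

theorem chunks5_cons (x : Char) (xs : List Char) (o : List (List Char)) :
    chunks5 (x :: xs) o = chunks5 (xs.drop 4) (o ++ [x :: xs.take 4]) := by
  conv_lhs => unfold chunks5
  simp

theorem saltPairs_acc (salt : List Char) : ∀ (rest out : List Char),
    saltPairs rest salt out = out ++ saltPairs rest salt [] := by
  intro rest
  induction rest using listDropStep (k := 1) with
  | h0 => intro out; simp [saltPairs_nil]
  | h a t ih =>
    intro out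
    rw [saltPairs_cons, saltPairs_cons]
    rw [ih, ih (([] : List Char) ++ ([a] ++ List.take 1 t) ++ salt)]
    simp

theorem chunks5_acc : ∀ (s : List Char) (out : List (List Char)),
    chunks5 s out = out ++ chunks5 s [] := by
  intro s
  induction s using listDropStep (k := 4) with
  | h0 => intro out; simp [chunks5_nil]
  | h a t ih =>
    intro out
    rw [chunks5_cons, chunks5_cons]
    rw [ih, ih (([] : List (List Char)) ++ [a :: List.take 4 t])]
    simp

theorem alternate_acc : ∀ (items even odd : List (List Char)),
    alternate items even odd = (even ++ (alternate items [] []).1, odd ++ (alternate items [] []).2) := by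
  intro items
  induction items using listDropStep (k := 1) with
  | h0 => intro e o; simp [alternate]
  | h a t ih =>
    intro e o
    cases t with
    | nil => simp [alternate]
    | cons b t2 =>
      simp only [alternate, List.drop_succ_cons, List.drop_zero, List.nil_append] at ih ⊢
      rw [ih (e ++ [a]) (o ++ [b]), ih [a] [b]]
      simp

theorem saltFold (saltL : List Char) : ∀ (rest s : List Char),
    (if (List.foldl (saltStep saltL) ((1 : Int), s) rest).1 == 2
      then (List.foldl (saltStep saltL) ((1 : Int), s) rest).2 ++ saltL
      else (List.foldl (saltStep saltL) ((1 : Int), s) rest).2)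
    = s ++ saltPairs rest saltL [] := by
  intro rest
  induction rest using listDropStep (k := 1) with
  | h0 => intro s; simp [saltPairs_nil]
  | h a t ih =>
    intro s
    cases t with
    | nil =>
      simp [saltStep, saltPairs_cons, saltPairs_nil]
    | cons b t2 =>
      simp only [List.drop_succ_cons, List.drop_zero] at ih
      have hstep : List.foldl (saltStep saltL) ((1 : Int), s) (a :: b :: t2)
          = List.foldl (saltStep saltL) ((1 : Int), s ++ [a] ++ [b] ++ saltL) t2 := by
        simp [saltStep]
      rw [hstep]
      rw [ih (s ++ [a] ++ [b] ++ saltL)]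
      rw [saltPairs_cons]
      conv_rhs => rw [saltPairs_acc]
      simp

theorem even_slice {α : Type} (xs : List α) : (PySem.List.slice? xs (some 0) none 2).getD [] =
    List.filterMap (fun k => xs[2*k]?) (List.range ((xs.length+1)/2)) := by
  simp only [PySem.List.slice?, PySem.List.sliceIndices]
  norm_num
  have hc : (if 0 < xs.length then (((xs.length : Int) + 2 - 1) / 2).toNat else 0) = (xs.length+1)/2 := by
    by_cases h : 0 < xs.length <;> simp only [h, if_true, if_false] <;> omega
  rw [hc]
  apply List.filterMap_congr
  intro x _
  congr 1

theorem odd_slice {α : Type} (xs : List α) : (PySem.List.slice? xs (some 1) none 2).getD [] =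
    List.filterMap (fun k => xs[1+2*k]?) (List.range (xs.length/2)) := by
  simp only [PySem.List.slice?, PySem.List.sliceIndices]
  norm_num
  by_cases h : 1 < xs.length
  · have hm : (min 1 (xs.length:Int)) = 1 := by omega
    simp only [h, if_true, hm]
    have hc : (((xs.length:Int) - 1 + 2 - 1) / 2).toNat = xs.length/2 := by omega
    rw [hc]
    apply List.filterMap_congr
    intro x _
    congr 1
  · simp only [h, if_false]
    have : xs.length / 2 = 0 := by omega
    simp [this]

theorem evens_eq : ∀ (xs : List (List Char)),
    List.filterMap (fun k => xs[2*k]?) (List.range ((xs.length+1)/2)) = (alternate xs [] []).1 := by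
  intro xs
  induction xs using listDropStep (k := 1) with
  | h0 => simp [alternate]
  | h a t ih =>
    cases t with
    | nil => simp [alternate, List.range_succ]
    | cons b t2 =>
      have hlen : ((a :: b :: t2).length + 1) / 2 = (t2.length + 1) / 2 + 1 := by
        simp; omega
      rw [hlen, List.range_succ_eq_map, List.filterMap_cons, List.filterMap_map]
      simp only [List.drop_succ_cons, List.drop_zero] at ih
      have hf : (fun k => (a :: b :: t2)[2*k]?) ∘ Nat.succ = fun k => t2[2*k]? := by
        funext k
        show (a :: b :: t2)[2 * (k+1)]? = _
        have : 2 * (k + 1) = 2 * k + 1 + 1 := by omega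
        rw [this]
        simp
      rw [hf, ih]
      simp only [Nat.mul_zero, List.getElem?_cons_zero]
      simp [alternate, alternate_acc t2 [a] [b]]

theorem odds_eq : ∀ (xs : List (List Char)),
    List.filterMap (fun k => xs[1+2*k]?) (List.range (xs.length/2)) = (alternate xs [] []).2 := by
  intro xs
  induction xs using listDropStep (k := 1) with
  | h0 => simp [alternate]
  | h a t ih =>
    cases t with
    | nil => simp [alternate]
    | cons b t2 =>
      have hlen : (a :: b :: t2).length / 2 = t2.length / 2 + 1 := by
        simp; omega
      rw [hlen, List.range_succ_eq_map, List.filterMap_cons, List.filterMap_map]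
      simp only [List.drop_succ_cons, List.drop_zero] at ih
      have hf : (fun k => (a :: b :: t2)[1+2*k]?) ∘ Nat.succ = fun k => t2[1+2*k]? := by
        funext k
        show (a :: b :: t2)[1 + 2 * (k+1)]? = _
        have : 1 + 2 * (k + 1) = 1 + 2 * k + 1 + 1 := by omega
        rw [this]
        simp
      rw [hf, ih]
      simp only [Nat.mul_zero, Nat.add_zero, List.getElem?_cons_succ, List.getElem?_cons_zero]
      simp [alternate, alternate_acc t2 [a] [b]]

theorem mapRangeChunks : ∀ (full : List Char),
    List.map (fun k => (full.drop (5*k)).take 5) (List.range ((full.length + 4)/5)) = chunks5 full [] := by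
  intro full
  induction full using listDropStep (k := 4) with
  | h0 => simp [chunks5_nil]
  | h a t ih =>
    have hlen : ((a :: t).length + 4) / 5 = ((List.drop 4 t).length + 4) / 5 + 1 := by
      simp; omega
    rw [hlen, List.range_succ_eq_map, List.map_cons, List.map_map]
    have hf : (fun k => ((a :: t).drop (5*k)).take 5) ∘ Nat.succ
        = fun k => ((List.drop 4 t).drop (5*k)).take 5 := by
      funext k
      simp only [Function.comp_apply, List.drop_drop]
      rw [show 5 * Nat.succ k = (5 * k + 4) + 1 from by omega, List.drop_succ_cons]
      congr 1
      · congr 1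
        omega
    rw [hf, ih]
    rw [chunks5_cons]
    conv_rhs => rw [chunks5_acc]
    simp

theorem chunksA_eq (full : List Char) :
    (PySem.List.pyRange 0 (full.length : Int) 5).foldl (fun acc i =>
      if i + 5 < (full.length : Int) then
        acc ++ [PySem.List.slice full (some i) (some (i + 5))]
      else
        acc ++ [PySem.List.slice full (some i) (some (full.length : Int))]) []
    = chunks5 full [] := by
  have hbody : (fun (acc : List (List Char)) (i : Int) =>
      if i + 5 < (full.length : Int) then
        acc ++ [PySem.List.slice full (some i) (some (i + 5))]
      else
        acc ++ [PySem.List.slice full (some i) (some (full.length : Int))])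
      = fun acc i => acc ++ [if i + 5 < (full.length : Int) then
          PySem.List.slice full (some i) (some (i + 5))
        else PySem.List.slice full (some i) (some (full.length : Int))] := by
    funext acc i
    split <;> rfl
  rw [hbody, PySem.List.foldl_append_singleton_eq_map]
  rw [PySem.List.pyRange_of_pos 0 (full.length : Int) (by norm_num), List.map_map]
  have hcount : (if (0:Int) < (full.length : Int) then (((full.length : Int) - 0 + 5 - 1) / 5).toNat else 0)
      = (full.length + 4) / 5 := by
    by_cases h : (0:Int) < (full.length : Int) <;> simp only [h, if_true, if_false] <;> omega
  rw [hcount]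
  rw [← mapRangeChunks full]
  simp only [List.nil_append]
  apply List.map_congr_left
  intro k hk
  have hk5 : 5 * k < full.length := by
    simp only [List.mem_range] at hk
    omega
  simp only [Function.comp_apply]
  have hcast : ((0:Int) + 5 * (k:Int)) = ((5*k : Nat) : Int) := by omega
  by_cases h : ((0:Int) + 5 * (k:Int)) + 5 < (full.length : Int)
  · rw [if_pos h, hcast]
    rw [show ((5:Int)) = ((5:Nat):Int) from by norm_num]
    exact PySem.List.slice_natCast_add full (5*k) 5
  · rw [if_neg h]
    rw [hcast, PySem.List.slice_natCast]
    rw [List.take_of_length_le (by simp), List.take_of_length_le (by simp; omega)]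

theorem secondRev_eq (ys : List (List Char)) :
    (PySem.List.pyRange ((ys.length : Int) - 1) (-1) (-1)).foldl
      (fun acc i => acc ++ [PySem.List.pyGetD ys i []]) []
    = ys.reverse := by
  rw [PySem.List.pyRange_neg_one_eq_reverse, PySem.List.foldl_append_singleton_eq_map]
  have h1 : ((-1 : Int) + 1) = 0 := by ring
  have h2 : ((ys.length : Int) - 1 + 1) = (ys.length : Int) := by ring
  simp only [List.nil_append]
  rw [h1, h2, List.map_reverse]
  rw [PySem.List.map_pyGetD_pyRange_zero' ys ([] : List Char)]

theorem interleave_eq (xs ys : List (List Char)) :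
    (PySem.List.pyRange 0 ((min xs.length ys.length : Nat) : Int) 1).foldl
      (fun acc i => acc ++ [PySem.List.pyGetD xs i [] ++ PySem.List.pyGetD ys i []]) []
    = (xs.zip ys).map (fun p => p.1 ++ p.2) := by
  rw [PySem.List.foldl_append_singleton_eq_map]
  simp only [List.nil_append]
  apply List.ext_getElem
  · simp [PySem.List.length_pyRange_one]
    omega
  · intro i h1 h2
    simp only [List.getElem_map]
    rw [PySem.List.getElem_pyRange_one]
    have hi : i < min xs.length ys.length := by
      simpa [PySem.List.length_pyRange_one] using h1
    have hx : (0 + (i:Int)) = ((i:Nat):Int) := by push_cast; ring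
    rw [hx, PySem.List.pyGetD_natCast, PySem.List.pyGetD_natCast]
    rw [List.getD_eq_getElem xs [] (by omega), List.getD_eq_getElem ys [] (by omega)]
    rw [List.getElem_zip]

-- ===== VERDICT (by name: the statement is the Claim_ definition above) =====
theorem hash_variable_spec : Claim_equal_hash_variable := by
  unfold Claim_equal_hash_variable
  intro variable_ salt _ hpre
  unfold Spec_hash_variable
  obtain ⟨c, rest, hv⟩ : ∃ c rest, variable_.toList = c :: rest := by
    cases h : variable_.toList with
    | nil => exact absurd (String.toList_eq_nil_iff.mp h) hpre
    | cons c r => exact ⟨c, r, rfl⟩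
  simp only [hash_variable, hash_variable_alt]
  rw [hv]
  simp only [List.foldl_cons, List.drop_succ_cons, List.drop_zero]
  have hstep0 : saltStep salt.toList ((0 : Int), ([] : List Char)) c = (1, salt.toList) := by
    simp [saltStep]
  rw [hstep0]
  rw [saltFold salt.toList rest salt.toList]
  generalize hS : salt.toList ++ saltPairs rest salt.toList [] = S
  rw [chunksA_eq S]
  generalize hCH : chunks5 S [] = CH
  rw [even_slice CH, evens_eq CH, odd_slice CH, odds_eq CH]
  simp only [PySem.List.slice?_none_none_neg_one, Option.getD_some]
  rw [PySem.List.foldl_append_singleton_eq_map]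
  rw [PySem.List.foldl_append_singleton_eq_map (fun item : List Char => item.reverse)
      (alternate CH [] []).1 ([] : List (List Char))]
  simp only [List.nil_append]
  rw [secondRev_eq ((alternate CH [] []).2)]
  rw [interleave_eq (List.map (fun item : List Char => item.reverse) (alternate CH [] []).1)
      ((alternate CH [] []).2.reverse)]
  rw [List.zip_map_left, List.map_map]
  simp only [Function.comp_def, Prod.map_fst, Prod.map_snd, id_eq]
  simp only [List.sum_eq_foldl, List.foldl_map]
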